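-- pv_equiv track=rewrite | github.com/wymm045/race-candidates-app | collector_base.py | split_races_for_post
-- ===== SOURCE A (Python) =====
-- def split_races_for_post(races):
--     """
--     all_race_ai 追加後は送信件数が多くなるため、Render側の500/タイムアウトを避ける目的で分割送信する。
--     official_star → shadow_ai → all_race_ai の順で送る。
--     """
--     order = ["official_all", "official_star", "shadow_ai", "all_race_ai"]
--     grouped = {src: [] for src in order}
--     others = []
--
--     for race in races:
--         src = str((race or {}).get("candidate_source") or "official_all").strip() or "official_all"
--         if src in grouped:
--             grouped[src].append(race)
--         else:
--             others.append(race)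
--
--     ordered = []
--     for src in order:
--         ordered.extend(grouped[src])
--     ordered.extend(others)
--     return ordered
-- ===== SOURCE B (Python) =====
-- ORDER = ["official_all", "official_star", "shadow_ai", "all_race_ai"]
--
--
-- def _rank(race):
--     src = str((race or {}).get("candidate_source") or "official_all").strip() or "official_all"
--     try:
--         return ORDER.index(src)
--     except ValueError:
--         return len(ORDER)
--
--
-- def split_races_for_post(races):
--     """Single stable sort on the priority index instead of bucket lists."""
--     return sorted(races, key=_rank)
-- ===== Notes on version B (the rewrite author's own statement) =====
-- stated objective: idiomatic
-- what changed: Replaces A's bucket dictionary, others-list and multi-group concatenation by a single stable sort of the races on a priority-index key (unknown sources share rank len(order)), relying on sort stability to keep input order within each group.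
import Mathlib
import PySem

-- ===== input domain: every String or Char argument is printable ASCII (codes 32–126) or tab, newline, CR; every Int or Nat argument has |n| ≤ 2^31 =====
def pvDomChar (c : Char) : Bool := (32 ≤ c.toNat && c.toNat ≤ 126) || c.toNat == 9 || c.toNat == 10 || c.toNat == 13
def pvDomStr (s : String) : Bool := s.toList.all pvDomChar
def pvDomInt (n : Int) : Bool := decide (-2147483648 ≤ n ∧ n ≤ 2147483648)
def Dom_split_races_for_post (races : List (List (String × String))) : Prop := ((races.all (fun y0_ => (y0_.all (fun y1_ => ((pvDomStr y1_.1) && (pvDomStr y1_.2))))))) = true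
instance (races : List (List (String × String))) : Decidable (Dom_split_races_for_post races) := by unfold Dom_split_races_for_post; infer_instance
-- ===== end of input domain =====

-- B replaces A's bucket dictionary and multi-group concatenation by one stable sort
-- on a priority index (objective: idiomatic / alternative; not claimed faster).

-- shared helper: the source-normalization chain both Pythons perform on a race
-- str((race or {}).get("candidate_source") or "official_all").strip() or "official_all"
def pvSrc (race : List (String × String)) : String :=
  let v := PySem.Dict.get? (PySem.Dict.mk race) "candidate_source"
  let s := match v with
           | none => "official_all"
           | some t => if t = "" then "official_all" else t
  let t := PySem.Str.strip s
  if t = "" then "official_all" else t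

-- ===== PORT A =====
-- loop body of A (one race: bucket it if its source is a known key, else push to others)
def pvStepA (st : PySem.Dict String (List (List (String × String))) × List (List (String × String)))
    (race : List (String × String)) :
    PySem.Dict String (List (List (String × String))) × List (List (String × String)) :=
  let src := pvSrc race
  if (st.1.get? src).isSome then
    (st.1.modify src [] (fun l => l ++ [race]), st.2)
  else
    (st.1, st.2 ++ [race])

def split_races_for_post (races : List (List (String × String))) : List (List (String × String)) :=
  let order : List String := ["official_all", "official_star", "shadow_ai", "all_race_ai"]
  let grouped0 : PySem.Dict String (List (List (String × String))) :=
    order.foldl (fun d s => d.insert s []) (PySem.Dict.mk [])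
  let st := races.foldl pvStepA (grouped0, [])
  let ordered := order.foldl (fun acc src => acc ++ st.1.getD src []) []
  ordered ++ st.2

-- ===== PORT B =====
-- _rank: ORDER.index(src) with ValueError → len(ORDER)
def pvRank (race : List (String × String)) : Nat :=
  (PySem.List.index? ["official_all", "official_star", "shadow_ai", "all_race_ai"] (pvSrc race)).getD 4

def split_races_for_post_alt (races : List (List (String × String))) : List (List (String × String)) :=
  PySem.List.sorted races pvRank false

-- ===== PRECONDITION & SPEC =====
def Spec_split_races_for_post (races : List (List (String × String))) (out : List (List (String × String))) : Prop := out = split_races_for_post_alt races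
instance (races : List (List (String × String))) (out : List (List (String × String))) : Decidable (Spec_split_races_for_post races out) := by unfold Spec_split_races_for_post; infer_instance

-- ===== CLAIM (what is proved, stated in full; the proofs are below) =====
def Claim_equal_split_races_for_post : Prop := ∀ (races : List (List (String × String))), Dom_split_races_for_post races → Spec_split_races_for_post races (split_races_for_post races)

-- ===== LEMMAS AND PROOFS =====

-- notation shortcuts for the proofs
def pvFlt (i : Nat) (p : List (List (String × String))) : List (List (String × String)) :=
  p.filter (fun r => pvRank r == i)

def pvCat (p : List (List (String × String))) : List (List (String × String)) :=
  pvFlt 0 p ++ pvFlt 1 p ++ pvFlt 2 p ++ pvFlt 3 p ++ pvFlt 4 p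

theorem pvRank_lt5 (r : List (String × String)) : pvRank r < 5 := by
  unfold pvRank
  rcases h : PySem.List.index? ["official_all", "official_star", "shadow_ai", "all_race_ai"] (pvSrc r) with _ | k
  · simp
  · obtain ⟨hk, -⟩ := PySem.List.getElem_of_index?_eq_some h
    simpa using Nat.lt_of_lt_of_le hk (by norm_num)

theorem pvRank_mem_flt {a : List (String × String)} {i : Nat} {p : List (List (String × String))}
    (h : a ∈ pvFlt i p) : pvRank a = i := by
  have := (List.mem_filter.mp h).2
  simpa using this

theorem insertBy_append {α : Type} (bf : α → α → Bool) (x : α) (A B : List α)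
    (h : ∀ a ∈ A, bf x a = false) :
    PySem.List.insertBy bf x (A ++ B) = A ++ PySem.List.insertBy bf x B := by
  induction A with
  | nil => simp
  | cons a A ih =>
    have ha : bf x a = false := h a (by simp)
    simp only [List.cons_append, PySem.List.insertBy, ha]
    simp [ih (fun a ha' => h a (by simp [ha']))]

theorem insertBy_all {α : Type} (bf : α → α → Bool) (x : α) (B : List α)
    (h : ∀ b ∈ B, bf x b = true) :
    PySem.List.insertBy bf x B = x :: B := by
  cases B with
  | nil => simp [PySem.List.insertBy]
  | cons b B => simp [PySem.List.insertBy, h b (by simp)]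


theorem pvRank_of_src0 {r : List (String × String)} (h : pvSrc r = "official_all") : pvRank r = 0 := by
  unfold pvRank; rw [h]; decide

theorem pvRank_of_src1 {r : List (String × String)} (h : pvSrc r = "official_star") : pvRank r = 1 := by
  unfold pvRank; rw [h]; decide

theorem pvRank_of_src2 {r : List (String × String)} (h : pvSrc r = "shadow_ai") : pvRank r = 2 := by
  unfold pvRank; rw [h]; decide

theorem pvRank_of_src3 {r : List (String × String)} (h : pvSrc r = "all_race_ai") : pvRank r = 3 := by
  unfold pvRank; rw [h]; decide

theorem pvRank_of_src4 {r : List (String × String)}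
    (h0 : pvSrc r ≠ "official_all") (h1 : pvSrc r ≠ "official_star")
    (h2 : pvSrc r ≠ "shadow_ai") (h3 : pvSrc r ≠ "all_race_ai") : pvRank r = 4 := by
  have : PySem.List.index? ["official_all", "official_star", "shadow_ai", "all_race_ai"] (pvSrc r) = none := by
    rw [PySem.List.index?_eq_none_iff]
    simp [h0, h1, h2, h3]
  unfold pvRank; rw [this]; rfl

theorem pvFlt_cons (i : Nat) (r : List (String × String)) (p : List (List (String × String))) :
    pvFlt i (r :: p) = (if pvRank r == i then [r] else []) ++ pvFlt i p := by
  simp only [pvFlt, List.filter_cons]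
  by_cases h : (pvRank r == i) = true <;> simp [h]

theorem pvFlt_append_one (i : Nat) (p : List (List (String × String))) (x : List (String × String)) :
    pvFlt i (p ++ [x]) = pvFlt i p ++ (if pvRank x == i then [x] else []) := by
  by_cases h : (pvRank x == i) = true <;>
    simp [pvFlt, List.filter_append, h]

theorem pvStepA_known (r : List (String × String)) (a0 a1 a2 a3 o : List (List (String × String))) :
    (pvSrc r = "official_all" →
      pvStepA (PySem.Dict.mk [("official_all", a0), ("official_star", a1), ("shadow_ai", a2), ("all_race_ai", a3)], o) r
      = (PySem.Dict.mk [("official_all", a0 ++ [r]), ("official_star", a1), ("shadow_ai", a2), ("all_race_ai", a3)], o)) ∧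
    (pvSrc r = "official_star" →
      pvStepA (PySem.Dict.mk [("official_all", a0), ("official_star", a1), ("shadow_ai", a2), ("all_race_ai", a3)], o) r
      = (PySem.Dict.mk [("official_all", a0), ("official_star", a1 ++ [r]), ("shadow_ai", a2), ("all_race_ai", a3)], o)) ∧
    (pvSrc r = "shadow_ai" →
      pvStepA (PySem.Dict.mk [("official_all", a0), ("official_star", a1), ("shadow_ai", a2), ("all_race_ai", a3)], o) r
      = (PySem.Dict.mk [("official_all", a0), ("official_star", a1), ("shadow_ai", a2 ++ [r]), ("all_race_ai", a3)], o)) ∧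
    (pvSrc r = "all_race_ai" →
      pvStepA (PySem.Dict.mk [("official_all", a0), ("official_star", a1), ("shadow_ai", a2), ("all_race_ai", a3)], o) r
      = (PySem.Dict.mk [("official_all", a0), ("official_star", a1), ("shadow_ai", a2), ("all_race_ai", a3 ++ [r])], o)) := by
  refine ⟨fun h => ?_, fun h => ?_, fun h => ?_, fun h => ?_⟩ <;>
    simp [pvStepA, h, PySem.Dict.get?, PySem.Dict.modify, PySem.Dict.getD, PySem.Dict.insert,
      PySem.Dict.contains, List.any, List.find?]

theorem pvStepA_other (r : List (String × String)) (a0 a1 a2 a3 o : List (List (String × String)))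
    (h0 : pvSrc r ≠ "official_all") (h1 : pvSrc r ≠ "official_star")
    (h2 : pvSrc r ≠ "shadow_ai") (h3 : pvSrc r ≠ "all_race_ai") :
    pvStepA (PySem.Dict.mk [("official_all", a0), ("official_star", a1), ("shadow_ai", a2), ("all_race_ai", a3)], o) r
      = (PySem.Dict.mk [("official_all", a0), ("official_star", a1), ("shadow_ai", a2), ("all_race_ai", a3)], o ++ [r]) := by
  have e0 : ("official_all" == pvSrc r) = false := beq_eq_false_iff_ne.mpr (Ne.symm h0)
  have e1 : ("official_star" == pvSrc r) = false := beq_eq_false_iff_ne.mpr (Ne.symm h1)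
  have e2 : ("shadow_ai" == pvSrc r) = false := beq_eq_false_iff_ne.mpr (Ne.symm h2)
  have e3 : ("all_race_ai" == pvSrc r) = false := beq_eq_false_iff_ne.mpr (Ne.symm h3)
  simp [pvStepA, PySem.Dict.get?, List.find?, e0, e1, e2, e3]

theorem pvLoopA (p : List (List (String × String))) (a0 a1 a2 a3 o : List (List (String × String))) :
    p.foldl pvStepA
      (PySem.Dict.mk [("official_all", a0), ("official_star", a1), ("shadow_ai", a2), ("all_race_ai", a3)], o)
    = (PySem.Dict.mk [("official_all", a0 ++ pvFlt 0 p), ("official_star", a1 ++ pvFlt 1 p),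
        ("shadow_ai", a2 ++ pvFlt 2 p), ("all_race_ai", a3 ++ pvFlt 3 p)], o ++ pvFlt 4 p) := by
  induction p generalizing a0 a1 a2 a3 o with
  | nil => simp [pvFlt]
  | cons r p ih =>
    rw [List.foldl_cons]
    by_cases h0 : pvSrc r = "official_all"
    · rw [(pvStepA_known r a0 a1 a2 a3 o).1 h0, ih]
      simp [pvFlt_cons, pvRank_of_src0 h0]
    · by_cases h1 : pvSrc r = "official_star"
      · rw [(pvStepA_known r a0 a1 a2 a3 o).2.1 h1, ih]
        simp [pvFlt_cons, pvRank_of_src1 h1]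
      · by_cases h2 : pvSrc r = "shadow_ai"
        · rw [(pvStepA_known r a0 a1 a2 a3 o).2.2.1 h2, ih]
          simp [pvFlt_cons, pvRank_of_src2 h2]
        · by_cases h3 : pvSrc r = "all_race_ai"
          · rw [(pvStepA_known r a0 a1 a2 a3 o).2.2.2 h3, ih]
            simp [pvFlt_cons, pvRank_of_src3 h3]
          · rw [pvStepA_other r a0 a1 a2 a3 o h0 h1 h2 h3, ih]
            simp [pvFlt_cons, pvRank_of_src4 h0 h1 h2 h3]

theorem pvA_eq_cat (races : List (List (String × String))) :
    split_races_for_post races = pvCat races := by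
  unfold split_races_for_post
  dsimp only
  rw [show List.foldl (fun (d : PySem.Dict String (List (List (String × String)))) s => d.insert s [])
        (PySem.Dict.mk []) ["official_all", "official_star", "shadow_ai", "all_race_ai"]
      = PySem.Dict.mk [("official_all", []), ("official_star", []), ("shadow_ai", []), ("all_race_ai", [])]
      from rfl]
  rw [pvLoopA]
  simp [PySem.Dict.getD, PySem.Dict.get?, List.find?, pvCat, List.append_assoc]

theorem pvInsertCat (x : List (String × String)) (p : List (List (String × String))) :
    PySem.List.insertBy (fun a b => decide (pvRank a < pvRank b)) x (pvCat p) = pvCat (p ++ [x]) := by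
  have h5 := pvRank_lt5 x
  have hcat : pvCat (p ++ [x]) = pvFlt 0 p ++ (if pvRank x == 0 then [x] else [])
      ++ (pvFlt 1 p ++ (if pvRank x == 1 then [x] else []))
      ++ (pvFlt 2 p ++ (if pvRank x == 2 then [x] else []))
      ++ (pvFlt 3 p ++ (if pvRank x == 3 then [x] else []))
      ++ (pvFlt 4 p ++ (if pvRank x == 4 then [x] else [])) := by
    simp [pvCat, pvFlt_append_one, List.append_assoc]
  set r := pvRank x with hr
  interval_cases r
  · rw [hcat]
    unfold pvCat
    rw [show pvFlt 0 p ++ pvFlt 1 p ++ pvFlt 2 p ++ pvFlt 3 p ++ pvFlt 4 p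
        = pvFlt 0 p ++ (pvFlt 1 p ++ pvFlt 2 p ++ pvFlt 3 p ++ pvFlt 4 p) by simp [List.append_assoc]]
    rw [insertBy_append _ _ _ _ (by
      intro a ha
      have := pvRank_mem_flt ha
      simp [this, ← hr])]
    rw [insertBy_all _ _ _ (by
      intro b hb
      simp only [List.mem_append] at hb
      rcases hb with ((hb | hb) | hb) | hb <;>
        · have := pvRank_mem_flt hb
          simp [this, ← hr])]
    simp [List.append_assoc]
  · rw [hcat]
    unfold pvCat
    rw [show pvFlt 0 p ++ pvFlt 1 p ++ pvFlt 2 p ++ pvFlt 3 p ++ pvFlt 4 p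
        = (pvFlt 0 p ++ pvFlt 1 p) ++ (pvFlt 2 p ++ pvFlt 3 p ++ pvFlt 4 p) by simp [List.append_assoc]]
    rw [insertBy_append _ _ _ _ (by
      intro a ha
      simp only [List.mem_append] at ha
      rcases ha with ha | ha <;>
        · have := pvRank_mem_flt ha
          simp [this, ← hr])]
    rw [insertBy_all _ _ _ (by
      intro b hb
      simp only [List.mem_append] at hb
      rcases hb with (hb | hb) | hb <;>
        · have := pvRank_mem_flt hb
          simp [this, ← hr])]
    simp [List.append_assoc]
  · rw [hcat]
    unfold pvCat
    rw [show pvFlt 0 p ++ pvFlt 1 p ++ pvFlt 2 p ++ pvFlt 3 p ++ pvFlt 4 p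
        = (pvFlt 0 p ++ pvFlt 1 p ++ pvFlt 2 p) ++ (pvFlt 3 p ++ pvFlt 4 p) by simp [List.append_assoc]]
    rw [insertBy_append _ _ _ _ (by
      intro a ha
      simp only [List.mem_append] at ha
      rcases ha with (ha | ha) | ha <;>
        · have := pvRank_mem_flt ha
          simp [this, ← hr])]
    rw [insertBy_all _ _ _ (by
      intro b hb
      simp only [List.mem_append] at hb
      rcases hb with hb | hb <;>
        · have := pvRank_mem_flt hb
          simp [this, ← hr])]
    simp [List.append_assoc]
  · rw [hcat]
    unfold pvCat
    rw [show pvFlt 0 p ++ pvFlt 1 p ++ pvFlt 2 p ++ pvFlt 3 p ++ pvFlt 4 p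
        = (pvFlt 0 p ++ pvFlt 1 p ++ pvFlt 2 p ++ pvFlt 3 p) ++ pvFlt 4 p by simp [List.append_assoc]]
    rw [insertBy_append _ _ _ _ (by
      intro a ha
      simp only [List.mem_append] at ha
      rcases ha with ((ha | ha) | ha) | ha <;>
        · have := pvRank_mem_flt ha
          simp [this, ← hr])]
    rw [insertBy_all _ _ _ (by
      intro b hb
      have := pvRank_mem_flt hb
      simp [this, ← hr])]
    simp [List.append_assoc]
  · rw [hcat]
    unfold pvCat
    rw [PySem.List.insertBy_of_forall_not_before _ _ _ (by
      intro a ha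
      simp only [List.mem_append] at ha
      rcases ha with (((ha | ha) | ha) | ha) | ha <;>
        · have := pvRank_mem_flt ha
          simp [this, ← hr])]
    simp [List.append_assoc]

theorem pvB_eq_cat (races : List (List (String × String))) :
    split_races_for_post_alt races = pvCat races := by
  unfold split_races_for_post_alt
  rw [PySem.List.sorted_eq_foldl_insertBy]
  induction races using List.reverseRecOn with
  | nil => simp [pvCat, pvFlt]
  | append_singleton p x ih =>
    rw [List.foldl_append, List.foldl_cons, List.foldl_nil, ih, pvInsertCat]

-- ===== VERDICT (by name: the statement is the Claim_ definition above) =====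
theorem split_races_for_post_spec : Claim_equal_split_races_for_post := by
  intro races _
  unfold Spec_split_races_for_post
  rw [pvA_eq_cat, pvB_eq_cat]
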